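-- pv_equiv track=rewrite | github.com/ZoredA/PScripts | PrintDictionary.py | get_extreme_dicts
-- ===== SOURCE A (Python) =====
-- def get_extreme_dicts(dict_col):
--     smallest_dict = dict_col[0]
--     largest_dict = dict_col[0]
--     for dic in dict_col:
--         if len(dic) < len(smallest_dict):
--             smallest_dict = dic
--         if len(dic) > len(largest_dict):
--             largest_dict = dic
--     return (smallest_dict, largest_dict)
-- ===== SOURCE B (Python) =====
-- def get_extreme_dicts(dict_col):
--     # Stable sort by length: the first element of the ascending sort is the
--     # FIRST dict of minimal length, and of the descending sort the FIRST dict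
--     # of maximal length (Python's sort is stable and reverse=True keeps the
--     # original order among equal keys) -- matching A's strict-inequality
--     # first-extreme tie-breaking.
--     return (sorted(dict_col, key=len)[0],
--             sorted(dict_col, key=len, reverse=True)[0])
-- ===== Notes on version B (the rewrite author's own statement) =====
-- stated objective: alternative
-- what changed: Replaces A's single combined accumulator loop with sort-based selection: stable-sort the collection by length (ascending and descending) and take the first element of each, whose stability reproduces A's first-extreme tie-breaking.
import Mathlib
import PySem

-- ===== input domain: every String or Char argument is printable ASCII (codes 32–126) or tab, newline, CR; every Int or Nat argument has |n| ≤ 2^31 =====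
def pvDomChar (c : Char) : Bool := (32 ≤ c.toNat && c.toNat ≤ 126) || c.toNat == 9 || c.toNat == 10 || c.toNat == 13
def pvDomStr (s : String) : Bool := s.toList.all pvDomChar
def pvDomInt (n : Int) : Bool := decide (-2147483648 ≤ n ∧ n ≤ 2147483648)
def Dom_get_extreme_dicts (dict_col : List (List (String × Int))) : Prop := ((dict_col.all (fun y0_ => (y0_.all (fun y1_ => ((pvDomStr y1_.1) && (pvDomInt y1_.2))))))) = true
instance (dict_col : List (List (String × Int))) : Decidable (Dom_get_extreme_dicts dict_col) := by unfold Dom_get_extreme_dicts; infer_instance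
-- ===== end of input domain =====

-- B replaces A's combined accumulator loop by sort-based selection: stable-sort by
-- length ascending/descending and take the first element of each; same result, not faster.

-- type-convention bridge (used identically by both ports): each inner assoc list
-- stands for a Python dict, so it is read through dict() semantics (duplicate keys
-- collapse, last value wins, first-occurrence position) before len/return.
def pvItems (d : List (String × Int)) : List (String × Int) :=
  (PySem.Dict.ofList d).items

-- ===== PORT A =====
def get_extreme_dicts (dict_col : List (List (String × Int))) : (List (String × Int)) × (List (String × Int)) :=
  let col := dict_col.map pvItems
  match col with
  | [] => ([], [])   -- dict_col[0] raises IndexError in Python; excluded by Pre_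
  | d0 :: _ =>
    -- smallest_dict = largest_dict = dict_col[0]; then one loop over dict_col
    col.foldl (fun st dic =>
      (if PySem.List.len dic < PySem.List.len st.1 then dic else st.1,
       if PySem.List.len dic > PySem.List.len st.2 then dic else st.2)) (d0, d0)

-- ===== PORT B =====
def get_extreme_dicts_alt (dict_col : List (List (String × Int))) : (List (String × Int)) × (List (String × Int)) :=
  let col := dict_col.map pvItems
  match PySem.List.sorted col PySem.List.len false, PySem.List.sorted col PySem.List.len true with
  | s :: _, l :: _ => (s, l)
  | _, _ => ([], [])   -- sorted(...)[0] raises IndexError on the empty collection; excluded by Pre_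

-- ===== PRECONDITION & SPEC =====
-- Pre_ excludes only the empty collection, on which A raises IndexError (and B IndexError too).
def Pre_get_extreme_dicts (dict_col : List (List (String × Int))) : Prop := dict_col ≠ []
instance (dict_col : List (List (String × Int))) : Decidable (Pre_get_extreme_dicts dict_col) := by unfold Pre_get_extreme_dicts; infer_instance

def pvWitness_get_extreme_dicts : (List (List (String × Int))) := [[("a", 1), ("b", 2)], [("c", 3)]]

def Spec_get_extreme_dicts (dict_col : List (List (String × Int))) (out : (List (String × Int)) × (List (String × Int))) : Prop := out = get_extreme_dicts_alt dict_col
instance (dict_col : List (List (String × Int))) (out : (List (String × Int)) × (List (String × Int))) : Decidable (Spec_get_extreme_dicts dict_col out) := by unfold Spec_get_extreme_dicts; infer_instance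

-- ===== CLAIM =====
def Claim_equal_get_extreme_dicts : Prop := ∀ (dict_col : List (List (String × Int))), Dom_get_extreme_dicts dict_col → Pre_get_extreme_dicts dict_col → Spec_get_extreme_dicts dict_col (get_extreme_dicts dict_col)

-- ===== LEMMAS AND PROOFS =====

-- A's combined pair fold splits into two independent folds.
theorem pv_pair_fold (t : List (List (String × Int))) (s l : List (String × Int)) :
    t.foldl (fun st dic =>
      (if PySem.List.len dic < PySem.List.len st.1 then dic else st.1,
       if PySem.List.len dic > PySem.List.len st.2 then dic else st.2)) (s, l)
    = (t.foldl (fun m x => if PySem.List.len x < PySem.List.len m then x else m) s,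
       t.foldl (fun m x => if PySem.List.len x > PySem.List.len m then x else m) l) := by
  induction t generalizing s l with
  | nil => rfl
  | cons d t ih => simp only [List.foldl_cons, ih]

-- The head of the insertion-sort fold evolves exactly as the running
-- first-extreme fold: inserting x into h :: acc puts x first iff before x h.
theorem pv_head_foldl_insertBy {α : Type} (before : α → α → Bool)
    (t : List α) (h : α) (acc : List α) :
    ∃ rest, t.foldl (fun a x => PySem.List.insertBy before x a) (h :: acc)
      = (t.foldl (fun m x => if before x m then x else m) h) :: rest := by
  induction t generalizing h acc with
  | nil => exact ⟨acc, rfl⟩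
  | cons x t ih =>
    simp only [List.foldl_cons, PySem.List.insertBy]
    by_cases hx : before x h
    · simpa [hx] using ih x (h :: acc)
    · simpa [hx] using ih h (PySem.List.insertBy before x acc)

-- ===== VERDICT =====
theorem get_extreme_dicts_spec : Claim_equal_get_extreme_dicts := by
  intro dict_col _ hpre
  unfold Spec_get_extreme_dicts get_extreme_dicts get_extreme_dicts_alt
  cases hcol : dict_col.map pvItems with
  | nil => exact absurd (List.map_eq_nil_iff.mp hcol) hpre
  | cons d0 t =>
    obtain ⟨r1, h1⟩ := pv_head_foldl_insertBy
      (fun a b => decide (PySem.List.len a < PySem.List.len b)) t d0 []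
    obtain ⟨r2, h2⟩ := pv_head_foldl_insertBy
      (fun a b => decide (PySem.List.len b < PySem.List.len a)) t d0 []
    dsimp only
    rw [PySem.List.sorted_eq_foldl_insertBy, PySem.List.sorted_rev_eq_foldl_insertBy,
      List.foldl_cons, List.foldl_cons]
    show (List.foldl _ (d0, d0) (d0 :: t)) =
      (match List.foldl _ (PySem.List.insertBy _ d0 []) t,
             List.foldl _ (PySem.List.insertBy _ d0 []) t with
       | s :: _, l :: _ => (s, l)
       | _, _ => ([], []))
    simp only [PySem.List.insertBy] at h1 h2 ⊢
    rw [h1, h2]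
    simp only [List.foldl_cons, pv_pair_fold, lt_irrefl, if_false, gt_iff_lt]
    simp
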